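-- pv_equiv track=rewrite | github.com/chaimae098/Algorithme-et-python | Devoir1.py | phrases
-- ===== SOURCE A (Python) =====
-- def phrases(texte):
--     temp=[]
--     ph=""
--     for ch in texte:
--         ph+=ch
--         if ch in ".!?":
--             if ph.strip()!="":
--                 temp.append(ph.strip())
--             ph=""
--     if ph.strip()!="":
--         temp.append(ph.strip())
--     return temp
-- ===== SOURCE B (Python) =====
-- def phrases(texte):
--     # Right-to-left pass: build the segment list back-to-front, then strip/filter once.
--     segs = [""]
--     for ch in reversed(texte):
--         if ch in ".!?":
--             segs.insert(0, ch)
--         else: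
--             segs[0] = ch + segs[0]
--     return [s for s in (seg.strip() for seg in segs) if s]
-- ===== Notes on version B (the rewrite author's own statement) =====
-- stated objective: alternative
-- what changed: B traverses the text right-to-left building the segment list back-to-front (a new segment at each delimiter, prepending characters otherwise) and strips/filters in one final comprehension, instead of A's left-to-right scan threading a character buffer and an output accumulator.
import Mathlib
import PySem

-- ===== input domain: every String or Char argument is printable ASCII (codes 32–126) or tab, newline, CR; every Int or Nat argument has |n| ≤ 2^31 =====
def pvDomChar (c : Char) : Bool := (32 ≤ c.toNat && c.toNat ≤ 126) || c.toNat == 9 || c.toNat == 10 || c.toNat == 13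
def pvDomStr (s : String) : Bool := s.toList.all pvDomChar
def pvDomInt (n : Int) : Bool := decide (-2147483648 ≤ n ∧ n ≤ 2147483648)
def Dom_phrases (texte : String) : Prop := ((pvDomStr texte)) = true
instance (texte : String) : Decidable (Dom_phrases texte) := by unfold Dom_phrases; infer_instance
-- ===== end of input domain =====

-- B builds the segment list back-to-front over the reversed text and strips/filters once at the end;
-- alternative structure, same cost.

-- 'ch in ".!?"' for a single character
def pvDelim (ch : Char) : Bool := ch = '.' || ch = '!' || ch = '?'

-- ===== PORT A =====
def phrasesStep (st : List (List Char) × List Char) (ch : Char) :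
    List (List Char) × List Char :=
  let ph := st.2 ++ [ch]
  if pvDelim ch then
    (if PySem.Chars.strip ph ≠ [] then st.1 ++ [PySem.Chars.strip ph] else st.1, [])
  else (st.1, ph)

def phrases (texte : String) : List String :=
  let st := texte.toList.foldl phrasesStep ([], [])
  let temp := if PySem.Chars.strip st.2 ≠ [] then st.1 ++ [PySem.Chars.strip st.2] else st.1
  temp.map (fun l => String.ofList l)

-- ===== PORT B =====
def altStep (segs : List (List Char)) (ch : Char) : List (List Char) :=
  if pvDelim ch then [ch] :: segs
  else
    match segs with
    | s :: rest => (ch :: s) :: rest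
    | [] => []

def phrases_alt (texte : String) : List String :=
  let segs := texte.toList.reverse.foldl altStep [[]]
  ((segs.map (fun seg => PySem.Chars.strip seg)).filter (fun s => !s.isEmpty)).map
    (fun l => String.ofList l)

-- ===== PRECONDITION & SPEC =====
def Spec_phrases (texte : String) (out : List String) : Prop := out = phrases_alt texte
instance (texte : String) (out : List String) : Decidable (Spec_phrases texte out) := by unfold Spec_phrases; infer_instance

-- ===== CLAIM (what is proved, stated in full; the proofs are below) =====
def Claim_equal_phrases : Prop := ∀ (texte : String), Dom_phrases texte → Spec_phrases texte (phrases texte)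

-- ===== LEMMAS AND PROOFS =====

-- B's foldr-view segmentation of the character list
def pvSegs (cs : List Char) : List (List Char) :=
  List.foldr (fun ch segs => altStep segs ch) [[]] cs

def pvFME (segs : List (List Char)) : List (List Char) :=
  (segs.map (fun seg => PySem.Chars.strip seg)).filter (fun s => !s.isEmpty)

def pvFin (st : List (List Char) × List Char) : List (List Char) :=
  if PySem.Chars.strip st.2 ≠ [] then st.1 ++ [PySem.Chars.strip st.2] else st.1

lemma phrasesStep_delim (st : List (List Char) × List Char) (ch : Char)
    (h : pvDelim ch = true) :
    phrasesStep st ch =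
      (if PySem.Chars.strip (st.2 ++ [ch]) ≠ [] then
        st.1 ++ [PySem.Chars.strip (st.2 ++ [ch])] else st.1, []) := by
  simp [phrasesStep, h]

lemma phrasesStep_nodelim (st : List (List Char) × List Char) (ch : Char)
    (h : ¬ pvDelim ch = true) :
    phrasesStep st ch = (st.1, st.2 ++ [ch]) := by
  simp [phrasesStep, h]

lemma pvSegs_cons_delim (c : Char) (cs : List Char) (h : pvDelim c = true) :
    pvSegs (c :: cs) = [c] :: pvSegs cs := by
  simp [pvSegs, altStep, h]

lemma pvSegs_cons_nodelim (c : Char) (cs : List Char) (h : ¬ pvDelim c = true) :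
    pvSegs (c :: cs) =
      match pvSegs cs with
      | s :: rest => (c :: s) :: rest
      | [] => [] := by
  simp [pvSegs, altStep, h]

lemma pvSegs_ne_nil (cs : List Char) : pvSegs cs ≠ [] := by
  induction cs with
  | nil => simp [pvSegs]
  | cons c cs ih =>
    by_cases h : pvDelim c = true
    · rw [pvSegs_cons_delim c cs h]; simp
    · rw [pvSegs_cons_nodelim c cs h]
      cases hh : pvSegs cs with
      | nil => exact absurd hh ih
      | cons s rest => simp

lemma pvModNil (segs : List (List Char)) :
    segs.modifyHead (fun s => ([] : List Char) ++ s) = segs := by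
  cases segs <;> simp

lemma pvFME_cons (s : List Char) (segs : List (List Char)) :
    pvFME (s :: segs) =
      (if PySem.Chars.strip s ≠ [] then [PySem.Chars.strip s] else []) ++ pvFME segs := by
  simp only [pvFME, List.map_cons, List.filter_cons]
  by_cases h : PySem.Chars.strip s = []
  · simp [h]
  · simp [h]

lemma pvFoldA (cs : List Char) : ∀ (temp : List (List Char)) (ph : List Char),
    pvFin (cs.foldl phrasesStep (temp, ph)) = temp ++ pvFin (cs.foldl phrasesStep ([], ph)) := by
  induction cs with
  | nil =>
    intro temp ph
    simp only [List.foldl_nil, pvFin]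
    by_cases h : PySem.Chars.strip ph = [] <;> simp [h]
  | cons c cs ih =>
    intro temp ph
    rw [List.foldl_cons, List.foldl_cons]
    by_cases hc : pvDelim c = true
    · rw [phrasesStep_delim _ _ hc, phrasesStep_delim _ _ hc]
      by_cases hs : PySem.Chars.strip (ph ++ [c]) = []
      · simp only [hs, ne_eq, not_true_eq_false, if_false]
        exact ih temp []
      · simp only [ne_eq, hs, not_false_eq_true, if_true, List.nil_append]
        rw [ih (temp ++ [PySem.Chars.strip (ph ++ [c])]) [],
            ih [PySem.Chars.strip (ph ++ [c])] []]
        simp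
    · rw [phrasesStep_nodelim _ _ hc, phrasesStep_nodelim _ _ hc]
      exact ih temp (ph ++ [c])

lemma pvMain (cs : List Char) : ∀ (ph : List Char),
    pvFin (cs.foldl phrasesStep ([], ph)) = pvFME ((pvSegs cs).modifyHead (fun s => ph ++ s)) := by
  induction cs with
  | nil =>
    intro ph
    simp only [List.foldl_nil, pvSegs, List.foldr_nil, List.modifyHead_cons, pvFin]
    rw [pvFME_cons]
    simp [pvFME]
  | cons c cs ih =>
    intro ph
    rw [List.foldl_cons]
    by_cases hc : pvDelim c = true
    · rw [phrasesStep_delim _ _ hc, pvSegs_cons_delim c cs hc, List.modifyHead_cons,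
          pvFME_cons]
      by_cases hs : PySem.Chars.strip (ph ++ [c]) = []
      · simp only [hs, ne_eq, not_true_eq_false, if_false, List.nil_append]
        rw [ih [], pvModNil]
      · simp only [ne_eq, hs, not_false_eq_true, if_true, List.nil_append]
        rw [pvFoldA, ih [], pvModNil]
    · rw [phrasesStep_nodelim _ _ hc, ih (ph ++ [c]), pvSegs_cons_nodelim c cs hc]
      cases hh : pvSegs cs with
      | nil => exact absurd hh (pvSegs_ne_nil cs)
      | cons s rest => simp

-- ===== VERDICT (by name: the statement is the Claim_ definition above) =====
theorem phrases_spec : Claim_equal_phrases := by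
  intro texte _
  unfold Spec_phrases phrases phrases_alt
  rw [List.foldl_reverse]
  have h := pvMain texte.toList []
  rw [pvModNil] at h
  simp only [pvFin] at h
  simp only [pvSegs, pvFME] at h
  simp only [h]
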